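-- pv_equiv track=rewrite | github.com/MrBrantCode/unitest_baseline | mut_generate/mist_train_cf/cf_84676/solution.py | dict_of_products
-- ===== SOURCE A (Python) =====
-- def dict_of_products(list_of_tuples):
--     dict_of_products = {}
--     for tup in list_of_tuples:
--         if tup[0] not in dict_of_products:
--             dict_of_products[tup[0]] = [tup[0]*tup[1]]
--         else:
--             dict_of_products[tup[0]].append(tup[0]*tup[1])
--     return dict_of_products
-- ===== SOURCE B (Python) =====
-- def dict_of_products(list_of_tuples):
--     keys = list(dict.fromkeys(a for a, _ in list_of_tuples))
--     return {k: [a * b for a, b in list_of_tuples if a == k] for k in keys}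
-- ===== Notes on version B (the rewrite author's own statement) =====
-- stated objective: simpler
-- what changed: A builds the dict in one pass with a membership test and in-place append per tuple; B first dedups the first elements (dict.fromkeys) to get the key order, then builds each key's value with a single filtered comprehension over the whole list.
import Mathlib
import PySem

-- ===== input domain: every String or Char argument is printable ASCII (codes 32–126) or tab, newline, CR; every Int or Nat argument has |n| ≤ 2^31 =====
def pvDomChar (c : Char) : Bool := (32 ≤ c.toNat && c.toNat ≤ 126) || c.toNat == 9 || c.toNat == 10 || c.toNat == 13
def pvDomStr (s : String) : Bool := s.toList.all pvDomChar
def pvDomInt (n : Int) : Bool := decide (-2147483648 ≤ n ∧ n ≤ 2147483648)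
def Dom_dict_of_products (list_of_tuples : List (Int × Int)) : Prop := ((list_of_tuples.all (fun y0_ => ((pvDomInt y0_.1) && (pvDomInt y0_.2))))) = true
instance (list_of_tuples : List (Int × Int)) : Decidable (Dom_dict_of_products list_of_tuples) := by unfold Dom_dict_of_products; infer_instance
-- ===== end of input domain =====

-- B replaces A's single-pass membership-checked dict insertion by a two-pass
-- dedup-keys-then-filter decomposition (simpler; same exact result, key order included).

-- ===== PORT A =====
-- A: one pass; new key -> dict[key] = [prod], existing key -> append prod.
def dict_of_products (list_of_tuples : List (Int × Int)) : List (Int × List Int) :=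
  (list_of_tuples.foldl
    (fun d tup =>
      if d.contains tup.1 = false then
        d.insert tup.1 [tup.1 * tup.2]
      else
        d.modify tup.1 [] (· ++ [tup.1 * tup.2]))
    (PySem.Dict.empty : PySem.Dict Int (List Int))).items

-- ===== PORT B =====
-- B: keys = list(dict.fromkeys(firsts)); one filtered comprehension per key.
def dict_of_products_alt (list_of_tuples : List (Int × Int)) : List (Int × List Int) :=
  (PySem.List.dedup (list_of_tuples.map (·.1))).map
    (fun k => (k, (list_of_tuples.filter (fun t => t.1 == k)).map (fun t => t.1 * t.2)))

-- ===== PRECONDITION & SPEC =====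
def Spec_dict_of_products (list_of_tuples : List (Int × Int)) (out : List (Int × List Int)) : Prop := out = dict_of_products_alt list_of_tuples
instance (list_of_tuples : List (Int × Int)) (out : List (Int × List Int)) : Decidable (Spec_dict_of_products list_of_tuples out) := by unfold Spec_dict_of_products; infer_instance

-- ===== CLAIM (what is proved, stated in full; the proofs are below) =====
def Claim_equal_dict_of_products : Prop := ∀ (list_of_tuples : List (Int × Int)), Dom_dict_of_products list_of_tuples → Spec_dict_of_products list_of_tuples (dict_of_products list_of_tuples)

-- ===== LEMMAS AND PROOFS =====

-- A's branching step is exactly 'modify with default []' in both branches.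
theorem step_eq_modify (d : PySem.Dict Int (List Int)) (tup : Int × Int) :
    (if d.contains tup.1 = false then
        d.insert tup.1 [tup.1 * tup.2]
      else
        d.modify tup.1 [] (· ++ [tup.1 * tup.2]))
    = d.modify tup.1 [] (· ++ [tup.1 * tup.2]) := by
  by_cases h : d.contains tup.1 = false
  · simp [h, PySem.Dict.modify, PySem.Dict.getD_of_not_contains d ([] : List Int) h]
  · simp [h]

-- The fold A performs, viewed as a plain modify-append fold.
theorem foldA_eq (l : List (Int × Int)) :
    (l.foldl
      (fun d tup =>
        if d.contains tup.1 = false then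
          d.insert tup.1 [tup.1 * tup.2]
        else
          d.modify tup.1 [] (· ++ [tup.1 * tup.2]))
      (PySem.Dict.empty : PySem.Dict Int (List Int)))
    = l.foldl (fun d tup => d.modify tup.1 [] (· ++ [tup.1 * tup.2])) PySem.Dict.empty := by
  exact PySem.List.foldl_congr_mem l _ _ _ (fun d tup _ => step_eq_modify d tup)

theorem dict_of_products_spec : Claim_equal_dict_of_products := by
  intro l _
  show dict_of_products l = dict_of_products_alt l
  unfold dict_of_products dict_of_products_alt
  rw [foldA_eq]
  have hkeys :
      (l.foldl (fun d tup => d.modify tup.1 [] (· ++ [tup.1 * tup.2]))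
        (PySem.Dict.empty : PySem.Dict Int (List Int))).keys
      = PySem.Set.ofList (l.map (·.1)) := by
    have := PySem.Dict.keys_foldl_modify_key l (fun tup : Int × Int => tup.1)
      ([] : List Int) (fun _ tup v => v ++ [tup.1 * tup.2])
      (PySem.Dict.empty : PySem.Dict Int (List Int))
    simpa using this
  have hnodup :
      (l.foldl (fun d tup => d.modify tup.1 [] (· ++ [tup.1 * tup.2]))
        (PySem.Dict.empty : PySem.Dict Int (List Int))).keys.Nodup := by
    rw [hkeys]; exact PySem.Set.nodup_ofList _
  rw [PySem.Dict.items_eq_map_keys _ hnodup ([] : List Int), hkeys,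
    PySem.List.dedup_eq_ofList]
  apply List.map_congr_left
  intro k _
  have hfold :
      (l.foldl (fun d tup => d.modify tup.1 [] (· ++ [tup.1 * tup.2]))
        (PySem.Dict.empty : PySem.Dict Int (List Int)))
      = ((l.map (fun tup => (tup.1, tup.1 * tup.2))).foldl
          (fun d p => d.modify p.1 [] (· ++ [p.2]))
          (PySem.Dict.empty : PySem.Dict Int (List Int))) := by
    rw [List.foldl_map]
  rw [hfold, PySem.Dict.getD_foldl_modify_append]
  simp [List.filter_map, Function.comp_def]
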